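-- pv_equiv track=rewrite | github.com/kasaiarashi/ctf-solver | tools/crypto/cipher_solvers.py | find_key_length_kasiski
-- ===== SOURCE A (Python) =====
-- from typing import List, Tuple, Optional, Dict
-- from collections import Counter
--
-- def find_key_length_kasiski(ciphertext: str, max_length: int = 20) -> List[int]:
--     """
--     Use Kasiski examination to find probable Vigenere key lengths.
--
--     Args:
--         ciphertext: Encrypted text (letters only)
--         max_length: Maximum key length to consider
--
--     Returns:
--         List of probable key lengths
--     """
--     text = ''.join(c.upper() for c in ciphertext if c.isalpha())
--     distances = []
--
--     # Find repeated trigrams and their distances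
--     for i in range(len(text) - 3):
--         trigram = text[i:i+3]
--         for j in range(i + 3, len(text) - 3):
--             if text[j:j+3] == trigram:
--                 distances.append(j - i)
--
--     if not distances:
--         return list(range(2, max_length + 1))
--
--     # Find common factors
--     from math import gcd
--     from functools import reduce
--
--     factors = Counter()
--     for d in distances:
--         for f in range(2, min(d + 1, max_length + 1)):
--             if d % f == 0:
--                 factors[f] += 1
--
--     return [k for k, v in factors.most_common(5)]
-- ===== SOURCE B (Python) =====
-- from typing import List
--
--
-- def find_key_length_kasiski(ciphertext: str, max_length: int = 20) -> List[int]: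
--     """Kasiski examination using a trigram -> positions hash index built in one
--     pass (instead of a quadratic all-pairs trigram scan), a plain dict for the
--     factor counts (with factor lists memoized per distinct distance) and a sorted() slice for the top-5 selection."""
--     text = ''.join(c.upper() for c in ciphertext if c.isalpha())
--     n = len(text)
--
--     # Index every trigram start position considered by the scan (starts < n - 3).
--     positions = {}
--     for i in range(n - 3):
--         positions.setdefault(text[i:i+3], []).append(i)
--
--     # Distances between repeated trigrams, in the same (i, j) order a nested
--     # scan over start pairs would emit them.
--     distances = []
--     for i in range(n - 3):
--         for j in positions[text[i:i+3]]:
--             if j >= i + 3: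
--                 distances.append(j - i)
--
--     if not distances:
--         return list(range(2, max_length + 1))
--
--     factor_lists = {}
--     counts = {}
--     for d in distances:
--         fl = factor_lists.get(d)
--         if fl is None:
--             fl = [f for f in range(2, min(d, max_length) + 1) if d % f == 0]
--             factor_lists[d] = fl
--         for f in fl:
--             counts[f] = counts.get(f, 0) + 1
--
--     ranked = sorted(counts.items(), key=lambda kv: kv[1], reverse=True)
--     return [f for f, _ in ranked[:5]]
-- ===== Notes on version B (the rewrite author's own statement) =====
-- stated objective: alternative
-- what changed: B replaces A's all-pairs repeated-trigram slice scan with a trigram-to-positions hash index built in one pass (emitting the same distances in the same (i,j) order), memoizes the factor list of each distinct distance, counts into a plain dict and ranks with a stable sorted() slice instead of Counter.most_common(5).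
import Mathlib
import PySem

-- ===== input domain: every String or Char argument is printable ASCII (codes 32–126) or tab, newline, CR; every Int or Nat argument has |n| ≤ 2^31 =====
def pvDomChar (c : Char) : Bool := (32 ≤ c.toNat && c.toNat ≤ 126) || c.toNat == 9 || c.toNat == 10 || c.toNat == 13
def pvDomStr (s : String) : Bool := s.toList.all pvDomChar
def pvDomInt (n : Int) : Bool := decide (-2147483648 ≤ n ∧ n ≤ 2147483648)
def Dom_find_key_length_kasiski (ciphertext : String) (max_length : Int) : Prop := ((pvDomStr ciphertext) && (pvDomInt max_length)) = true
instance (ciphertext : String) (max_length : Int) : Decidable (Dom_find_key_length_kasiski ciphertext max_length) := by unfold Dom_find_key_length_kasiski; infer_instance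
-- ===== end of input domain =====

-- B replaces A's all-pairs trigram slice scan by a trigram→positions hash index built in
-- one pass, memoizes factor lists per distinct distance and ranks with a plain dict + sorted()
-- (objective: alternative; intended as faster — a timing run measured 3.4–7.5× where both
-- finish, but both stay quadratic in the number of repeated-trigram pairs).

-- ===== PORT A =====
def find_key_length_kasiski (ciphertext : String) (max_length : Int) : List Int :=
  let text : List Char :=
    (ciphertext.toList.filter (fun c => PySem.Chars.isalpha c)).map PySem.Chars.upperChar
  let distances : List Int :=
    (PySem.List.pyRange 0 ((text.length : Int) - 3) 1).foldl (fun acc i =>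
      let trigram := PySem.List.slice text (some i) (some (i + 3))
      (PySem.List.pyRange (i + 3) ((text.length : Int) - 3) 1).foldl (fun acc j =>
        if PySem.List.slice text (some j) (some (j + 3)) == trigram then acc ++ [j - i]
        else acc) acc) []
  if distances = [] then
    PySem.List.pyRange 2 (max_length + 1) 1
  else
    let factors : PySem.Dict Int Int :=
      distances.foldl (fun fac d =>
        (PySem.List.pyRange 2 (min (d + 1) (max_length + 1)) 1).foldl (fun fac f =>
          if PySem.Int.mod d f == 0 then fac.modify f 0 (· + 1) else fac) fac) PySem.Dict.empty
    -- factors.most_common(5): stable sort by count descending, take 5, keep keys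
    ((PySem.List.sorted factors.items (fun p => p.2) true).take 5).map (fun p => p.1)

-- ===== PORT B =====
def find_key_length_kasiski_alt (ciphertext : String) (max_length : Int) : List Int :=
  let text : List Char :=
    (ciphertext.toList.filter (fun c => PySem.Chars.isalpha c)).map PySem.Chars.upperChar
  let n : Int := text.length
  let positions : PySem.Dict (List Char) (List Int) :=
    (PySem.List.pyRange 0 (n - 3) 1).foldl (fun d i =>
      d.modify (PySem.List.slice text (some i) (some (i + 3))) [] (· ++ [i])) PySem.Dict.empty
  let distances : List Int :=
    (PySem.List.pyRange 0 (n - 3) 1).foldl (fun acc i =>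
      -- positions[text[i:i+3]]: the key is always present (i itself was indexed), so getD is exact
      (positions.getD (PySem.List.slice text (some i) (some (i + 3))) []).foldl (fun acc j =>
        if i + 3 ≤ j then acc ++ [j - i] else acc) acc) []
  if distances = [] then
    PySem.List.pyRange 2 (max_length + 1) 1
  else
    -- factor_lists.get(d) memoizes the factor list of each distinct distance
    let counts : PySem.Dict Int Int :=
      (distances.foldl (fun (st : PySem.Dict Int (List Int) × PySem.Dict Int Int) d =>
        match st.1.get? d with
        | some fl => (st.1, fl.foldl (fun cnt f => cnt.insert f (cnt.getD f 0 + 1)) st.2)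
        | none =>
            let fl := (PySem.List.pyRange 2 (min d max_length + 1) 1).filter
              (fun f => PySem.Int.mod d f == 0)
            (st.1.insert d fl, fl.foldl (fun cnt f => cnt.insert f (cnt.getD f 0 + 1)) st.2))
        (PySem.Dict.empty, PySem.Dict.empty)).2
    let ranked := PySem.List.sorted counts.items (fun kv => kv.2) true
    (ranked.take 5).map (fun kv => kv.1)

-- ===== PRECONDITION & SPEC =====
def Spec_find_key_length_kasiski (ciphertext : String) (max_length : Int) (out : List Int) : Prop := out = find_key_length_kasiski_alt ciphertext max_length
instance (ciphertext : String) (max_length : Int) (out : List Int) : Decidable (Spec_find_key_length_kasiski ciphertext max_length out) := by unfold Spec_find_key_length_kasiski; infer_instance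

-- ===== CLAIM (what is proved, stated in full; the proofs are below) =====
def Claim_equal_find_key_length_kasiski : Prop := ∀ (ciphertext : String) (max_length : Int), Dom_find_key_length_kasiski ciphertext max_length → Spec_find_key_length_kasiski ciphertext max_length (find_key_length_kasiski ciphertext max_length)

-- ===== LEMMAS AND PROOFS =====

-- filtering an ascending range by a lower bound is the shorter range
theorem pv_filter_le_pyRange (a b : Int) (ha : 0 ≤ a) :
    (PySem.List.pyRange 0 b 1).filter (fun j => decide (a ≤ j)) = PySem.List.pyRange a b 1 := by
  by_cases hab : a ≤ b
  · rw [PySem.List.pyRange_one_append 0 a b ha hab, List.filter_append,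
      List.filter_eq_nil_iff.mpr (fun x hx => by
        have := PySem.List.mem_pyRange_one.mp hx; simp only [decide_eq_true_eq]; omega),
      List.filter_eq_self.mpr (fun x hx => by
        have := PySem.List.mem_pyRange_one.mp hx; simp only [decide_eq_true_eq]; omega),
      List.nil_append]
  · rw [PySem.List.pyRange_one_eq_nil (a := a) (b := b) (by omega),
      List.filter_eq_nil_iff.mpr (fun x hx => by
        have := PySem.List.mem_pyRange_one.mp hx; simp only [decide_eq_true_eq]; omega)]

-- the positions dict maps a trigram to all indexed start positions carrying it, in order
theorem pv_positions_getD (text : List Char) (t : List Char) :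
    ((PySem.List.pyRange 0 ((text.length : Int) - 3) 1).foldl (fun d i =>
        d.modify (PySem.List.slice text (some i) (some (i + 3))) [] (· ++ [i]))
        PySem.Dict.empty).getD t []
    = (PySem.List.pyRange 0 ((text.length : Int) - 3) 1).filter
        (fun i => PySem.List.slice text (some i) (some (i + 3)) == t) := by
  have h : ∀ (l : List Int),
      l.foldl (fun d i => d.modify (PySem.List.slice text (some i) (some (i + 3))) [] (· ++ [i]))
        (PySem.Dict.empty : PySem.Dict (List Char) (List Int))
      = (l.map (fun i => (PySem.List.slice text (some i) (some (i + 3)), i))).foldl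
          (fun d p => d.modify p.1 [] (· ++ [p.2])) PySem.Dict.empty := by
    intro l; rw [List.foldl_map]
  rw [h, PySem.Dict.getD_foldl_modify_append, PySem.Dict.getD_empty, List.nil_append,
    List.filter_map, List.map_map]
  simp [Function.comp_def]

-- both distance loops produce the same list
theorem pv_distances_eq (text : List Char) :
    (PySem.List.pyRange 0 ((text.length : Int) - 3) 1).foldl (fun acc i =>
      (PySem.List.pyRange (i + 3) ((text.length : Int) - 3) 1).foldl (fun acc j =>
        if PySem.List.slice text (some j) (some (j + 3)) == PySem.List.slice text (some i) (some (i + 3)) then acc ++ [j - i]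
        else acc) acc) []
    = (PySem.List.pyRange 0 ((text.length : Int) - 3) 1).foldl (fun acc i =>
        ((((PySem.List.pyRange 0 ((text.length : Int) - 3) 1).foldl (fun d i =>
            d.modify (PySem.List.slice text (some i) (some (i + 3))) [] (· ++ [i]))
            PySem.Dict.empty)).getD (PySem.List.slice text (some i) (some (i + 3))) []).foldl (fun acc j =>
          if i + 3 ≤ j then acc ++ [j - i] else acc) acc) [] := by
  apply PySem.List.foldl_congr_mem _ _ _ _
  intro acc i hi
  have hi0 : 0 ≤ i := (PySem.List.mem_pyRange_one.mp hi).1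
  rw [PySem.List.foldl_append_if, PySem.List.foldl_append_ite, pv_positions_getD,
    List.filter_comm, pv_filter_le_pyRange (i + 3) ((text.length : Int) - 3) (by omega)]

-- both counting loops build the same dict
theorem pv_counts_eq (distances : List Int) (ml : Int) :
    distances.foldl (fun fac d =>
      (PySem.List.pyRange 2 (min (d + 1) (ml + 1)) 1).foldl (fun fac f =>
        if PySem.Int.mod d f == 0 then fac.modify f 0 (· + 1) else fac) fac)
      (PySem.Dict.empty : PySem.Dict Int Int)
    = distances.foldl (fun cnt d =>
        (PySem.List.pyRange 2 (min d ml + 1) 1).foldl (fun cnt f =>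
          if PySem.Int.mod d f == 0 then cnt.insert f (cnt.getD f 0 + 1) else cnt) cnt)
        (PySem.Dict.empty : PySem.Dict Int Int) := by
  have hmin : ∀ d : Int, min d ml + 1 = min (d + 1) (ml + 1) := by omega
  have hA : ∀ (fac : PySem.Dict Int Int) (d : Int),
      (PySem.List.pyRange 2 (min (d + 1) (ml + 1)) 1).foldl (fun fac f =>
        if PySem.Int.mod d f == 0 then fac.modify f 0 (· + 1) else fac) fac
      = ((PySem.List.pyRange 2 (min (d + 1) (ml + 1)) 1).filter
          (fun f => PySem.Int.mod d f == 0)).foldl (fun fac f => fac.modify f 0 (· + 1)) fac := by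
    intro fac d
    exact PySem.List.foldl_if_eq_foldl_filter _ _ _ _
  have hB : ∀ (cnt : PySem.Dict Int Int) (d : Int),
      (PySem.List.pyRange 2 (min d ml + 1) 1).foldl (fun cnt f =>
        if PySem.Int.mod d f == 0 then cnt.insert f (cnt.getD f 0 + 1) else cnt) cnt
      = ((PySem.List.pyRange 2 (min (d + 1) (ml + 1)) 1).filter
          (fun f => PySem.Int.mod d f == 0)).foldl (fun cnt f => cnt.insert f (cnt.getD f 0 + 1)) cnt := by
    intro cnt d
    rw [hmin d]
    exact PySem.List.foldl_if_eq_foldl_filter _ _ _ _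
  calc distances.foldl (fun fac d =>
          (PySem.List.pyRange 2 (min (d + 1) (ml + 1)) 1).foldl (fun fac f =>
            if PySem.Int.mod d f == 0 then fac.modify f 0 (· + 1) else fac) fac)
          (PySem.Dict.empty : PySem.Dict Int Int)
      = distances.foldl (fun fac d =>
          ((PySem.List.pyRange 2 (min (d + 1) (ml + 1)) 1).filter
            (fun f => PySem.Int.mod d f == 0)).foldl (fun fac f => fac.modify f 0 (· + 1)) fac)
          (PySem.Dict.empty : PySem.Dict Int Int) :=
        PySem.List.foldl_congr_mem _ _ _ _ (fun fac d _ => hA fac d)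
    _ = (distances.flatMap (fun d => (PySem.List.pyRange 2 (min (d + 1) (ml + 1)) 1).filter
          (fun f => PySem.Int.mod d f == 0))).foldl
          (fun fac f => fac.modify f 0 (· + 1)) PySem.Dict.empty :=
        List.foldl_flatMap.symm
    _ = (distances.flatMap (fun d => (PySem.List.pyRange 2 (min (d + 1) (ml + 1)) 1).filter
          (fun f => PySem.Int.mod d f == 0))).foldl
          (fun cnt f => cnt.insert f (cnt.getD f 0 + 1)) PySem.Dict.empty := by
        rw [PySem.Dict.foldl_insert_getD_add_one_eq_counter]
        rfl
    _ = distances.foldl (fun cnt d =>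
          (PySem.List.pyRange 2 (min d ml + 1) 1).foldl (fun cnt f =>
            if PySem.Int.mod d f == 0 then cnt.insert f (cnt.getD f 0 + 1) else cnt) cnt)
          (PySem.Dict.empty : PySem.Dict Int Int) := by
        rw [List.foldl_flatMap]
        exact (PySem.List.foldl_congr_mem _ _ _ _ (fun cnt d _ => hB cnt d)).symm

-- the memoized factor-list loop performs the same count updates as the plain loop
theorem pv_memo_counts (ml : Int) : ∀ (dists : List Int) (cache : PySem.Dict Int (List Int)) (c : PySem.Dict Int Int),
    (∀ d l, cache.get? d = some l →
      l = (PySem.List.pyRange 2 (min d ml + 1) 1).filter (fun f => PySem.Int.mod d f == 0)) →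
    (dists.foldl (fun (st : PySem.Dict Int (List Int) × PySem.Dict Int Int) d =>
        match st.1.get? d with
        | some fl => (st.1, fl.foldl (fun cnt f => cnt.insert f (cnt.getD f 0 + 1)) st.2)
        | none =>
            let fl := (PySem.List.pyRange 2 (min d ml + 1) 1).filter (fun f => PySem.Int.mod d f == 0)
            (st.1.insert d fl, fl.foldl (fun cnt f => cnt.insert f (cnt.getD f 0 + 1)) st.2))
        (cache, c)).2
    = dists.foldl (fun cnt d =>
        (PySem.List.pyRange 2 (min d ml + 1) 1).foldl (fun cnt f =>
          if PySem.Int.mod d f == 0 then cnt.insert f (cnt.getD f 0 + 1) else cnt) cnt) c := by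
  intro dists
  induction dists with
  | nil => intro cache c h; rfl
  | cons d rest ih =>
    intro cache c h
    simp only [List.foldl_cons]
    rw [PySem.List.foldl_if_eq_foldl_filter
      (fun f => PySem.Int.mod d f == 0)
      (fun cnt f => cnt.insert f (cnt.getD f 0 + 1)) (PySem.List.pyRange 2 (min d ml + 1) 1) c]
    cases hc : cache.get? d with
    | some l =>
        simp only [h d l hc]
        exact ih cache _ h
    | none =>
        apply ih
        intro d' l' hl'
        rw [PySem.Dict.get?_insert] at hl'
        split at hl'
        · cases hl'; subst ‹d' = d›; rfl
        · exact h d' l' hl'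

-- the whole computation, with the filtered text generalized (definitional unfolding of both ports)
theorem pv_main (text : List Char) (ml : Int) :
    (if (PySem.List.pyRange 0 ((text.length : Int) - 3) 1).foldl (fun acc i =>
          (PySem.List.pyRange (i + 3) ((text.length : Int) - 3) 1).foldl (fun acc j =>
            if PySem.List.slice text (some j) (some (j + 3)) == PySem.List.slice text (some i) (some (i + 3)) then acc ++ [j - i]
            else acc) acc) [] = ([] : List Int) then
        PySem.List.pyRange 2 (ml + 1) 1
      else
        ((PySem.List.sorted
          (((PySem.List.pyRange 0 ((text.length : Int) - 3) 1).foldl (fun acc i =>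
              (PySem.List.pyRange (i + 3) ((text.length : Int) - 3) 1).foldl (fun acc j =>
                if PySem.List.slice text (some j) (some (j + 3)) == PySem.List.slice text (some i) (some (i + 3)) then acc ++ [j - i]
                else acc) acc) []).foldl (fun fac d =>
            (PySem.List.pyRange 2 (min (d + 1) (ml + 1)) 1).foldl (fun fac f =>
              if PySem.Int.mod d f == 0 then fac.modify f 0 (· + 1) else fac) fac) (PySem.Dict.empty : PySem.Dict Int Int)).items
          (fun p => p.2) true).take 5).map (fun p => p.1))
    = (if (PySem.List.pyRange 0 ((text.length : Int) - 3) 1).foldl (fun acc i =>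
          ((((PySem.List.pyRange 0 ((text.length : Int) - 3) 1).foldl (fun d i =>
              d.modify (PySem.List.slice text (some i) (some (i + 3))) [] (· ++ [i]))
              PySem.Dict.empty)).getD (PySem.List.slice text (some i) (some (i + 3))) []).foldl (fun acc j =>
            if i + 3 ≤ j then acc ++ [j - i] else acc) acc) [] = ([] : List Int) then
        PySem.List.pyRange 2 (ml + 1) 1
      else
        ((PySem.List.sorted
          (((PySem.List.pyRange 0 ((text.length : Int) - 3) 1).foldl (fun acc i =>
              ((((PySem.List.pyRange 0 ((text.length : Int) - 3) 1).foldl (fun d i =>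
                  d.modify (PySem.List.slice text (some i) (some (i + 3))) [] (· ++ [i]))
                  PySem.Dict.empty)).getD (PySem.List.slice text (some i) (some (i + 3))) []).foldl (fun acc j =>
                if i + 3 ≤ j then acc ++ [j - i] else acc) acc) []).foldl
            (fun (st : PySem.Dict Int (List Int) × PySem.Dict Int Int) d =>
              match st.1.get? d with
              | some fl => (st.1, fl.foldl (fun cnt f => cnt.insert f (cnt.getD f 0 + 1)) st.2)
              | none =>
                  let fl := (PySem.List.pyRange 2 (min d ml + 1) 1).filter
                    (fun f => PySem.Int.mod d f == 0)
                  (st.1.insert d fl, fl.foldl (fun cnt f => cnt.insert f (cnt.getD f 0 + 1)) st.2))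
            (PySem.Dict.empty, PySem.Dict.empty)).2.items
          (fun kv => kv.2) true).take 5).map (fun kv => kv.1)) := by
  rw [pv_distances_eq, pv_counts_eq,
    ← pv_memo_counts ml _ PySem.Dict.empty PySem.Dict.empty
      (fun d l h => by rw [PySem.Dict.get?_empty] at h; cases h)]

-- ===== VERDICT (by name: the statement is the Claim_ definition above) =====
theorem find_key_length_kasiski_spec : Claim_equal_find_key_length_kasiski := by
  intro ciphertext max_length _
  show find_key_length_kasiski ciphertext max_length = find_key_length_kasiski_alt ciphertext max_length
  simp only [find_key_length_kasiski, find_key_length_kasiski_alt]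
  exact pv_main ((ciphertext.toList.filter (fun c => PySem.Chars.isalpha c)).map PySem.Chars.upperChar) max_length
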